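-- pv_equiv track=rewrite | github.com/reikland/CommentV2 | TestCommentV2.py | compute_root_id
-- ===== SOURCE A (Python) =====
-- from typing import Any, Dict, List, Optional, Iterable, Tuple
--
-- def compute_root_id(comment_id: Optional[int], parent_id: Optional[int], parent_map: Dict[int, Optional[int]]) -> Optional[int]:
--     if comment_id is None:
--         return None
--     # If no parent, root is self
--     x = comment_id
--     seen: set[int] = set()
--     while True:
--         if x is None or x in seen:
--             return comment_id
--         seen.add(x)
--         p = parent_map.get(x)
--         if p is None:
--             return x
--         x = p
-- ===== SOURCE B (Python) =====
-- def compute_root_id(comment_id, parent_id, parent_map):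
--     if comment_id is None:
--         return None
--     # Floyd tortoise-and-hare over the parent chain: fast walks two parent
--     # steps per round, slow walks one; whichever pointer first reaches a node
--     # with no parent is at the unique root of the chain, so return it; if slow
--     # and fast ever meet, the chain cycles and the answer is comment_id.
--     slow = fast = comment_id
--     while True:
--         p = parent_map.get(fast)
--         if p is None:
--             return fast
--         fast = p
--         p = parent_map.get(fast)
--         if p is None:
--             return fast
--         fast = p
--         p = parent_map.get(slow)
--         if p is None:
--             return slow
--         slow = p
--         if slow == fast:
--             return comment_id
-- ===== Notes on version B (the rewrite author's own statement) =====
-- stated objective: alternative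
-- what changed: Replaces A's visited-set walk with Floyd's tortoise-and-hare over the parent chain: a fast pointer takes two parent steps per round and a slow pointer one; whichever pointer first reaches a parentless node is the root, and a slow/fast meeting detects a cycle and returns comment_id, so no auxiliary set is kept.
import Mathlib
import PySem

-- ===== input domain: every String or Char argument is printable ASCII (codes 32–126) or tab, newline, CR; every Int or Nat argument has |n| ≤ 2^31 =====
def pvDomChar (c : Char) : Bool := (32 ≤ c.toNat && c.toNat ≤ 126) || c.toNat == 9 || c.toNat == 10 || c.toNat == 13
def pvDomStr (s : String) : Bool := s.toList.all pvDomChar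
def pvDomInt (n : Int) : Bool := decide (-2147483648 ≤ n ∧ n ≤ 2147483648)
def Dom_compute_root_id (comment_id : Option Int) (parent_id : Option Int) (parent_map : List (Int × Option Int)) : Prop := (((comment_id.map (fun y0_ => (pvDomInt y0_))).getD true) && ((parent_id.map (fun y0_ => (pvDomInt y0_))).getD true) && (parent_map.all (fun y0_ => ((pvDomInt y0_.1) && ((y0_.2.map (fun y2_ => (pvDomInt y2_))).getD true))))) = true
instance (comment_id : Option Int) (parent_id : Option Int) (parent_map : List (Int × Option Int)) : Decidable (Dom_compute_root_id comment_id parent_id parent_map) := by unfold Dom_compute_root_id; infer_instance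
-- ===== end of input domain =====

-- B replaces A's visited-set walk with Floyd's tortoise-and-hare over the
-- parent chain: O(1) extra space instead of A's auxiliary set (alternative).


-- ===== PORT A =====
-- p = parent_map.get(x): missing key and stored None both give None
def pvStep (m : List (Int × Option Int)) (x : Int) : Option Int :=
  ((PySem.Dict.mk m).get? x).join

-- the distinct keys of m whose .get is not None (for the termination measure)
def pvLiveKeys (m : List (Int × Option Int)) : Finset Int :=
  (m.map Prod.fst).toFinset.filter (fun k => pvStep m k ≠ none)

-- a key with pvStep some is a key of m (used by the termination proof)
theorem pvStep_mem_keys (m : List (Int × Option Int)) (x : Int)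
    (h : pvStep m x ≠ none) : x ∈ m.map Prod.fst := by
  induction m with
  | nil => simp [pvStep, PySem.Dict.get?] at h
  | cons hd tl ih =>
    obtain ⟨k, v⟩ := hd
    by_cases hx : k = x
    · simp [hx]
    · have h' : pvStep tl x ≠ none := by
        simpa [pvStep, PySem.Dict.get?_mk_cons, hx] using h
      simp [ih h']

-- A's while-loop: visited set `seen`, returns orig on revisit
def pvALoop (m : List (Int × Option Int)) (orig : Int) (x : Int)
    (seen : PySem.Set Int) : Int :=
  if PySem.Set.contains seen x then orig
  else
    match h : pvStep m x with
    | none => x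
    | some p => pvALoop m orig p (PySem.Set.add seen x)
termination_by ((pvLiveKeys m).filter (fun k => k ∉ seen)).card
decreasing_by
  have hxk : x ∈ pvLiveKeys m := by
    simp only [pvLiveKeys, Finset.mem_filter, List.mem_toFinset]
    exact ⟨pvStep_mem_keys m x (by simp [h]), by simp [h]⟩
  have hxs : x ∉ seen := by
    simpa [PySem.Set.contains] using ‹¬ PySem.Set.contains seen x = true›
  apply Finset.card_lt_card
  constructor
  · intro k hk
    simp only [Finset.mem_filter] at hk ⊢
    exact ⟨hk.1, fun hmem => hk.2 (by simpa using (PySem.Set.mem_add seen x k).mpr (Or.inl hmem))⟩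
  · intro hsub
    have hx' : x ∈ (pvLiveKeys m).filter (fun k => k ∉ seen) :=
      Finset.mem_filter.mpr ⟨hxk, by simpa using hxs⟩
    have h2 : x ∉ PySem.Set.add seen x := by
      simpa using (Finset.mem_filter.mp (hsub hx')).2
    exact h2 ((PySem.Set.mem_add seen x x).mpr (Or.inr rfl))

def compute_root_id (comment_id : Option Int) (_parent_id : Option Int)
    (parent_map : List (Int × Option Int)) : Option Int :=
  match comment_id with
  | none => none
  | some c => some (pvALoop parent_map c c PySem.Set.empty)

-- ===== PORT B =====
-- B's while-True: fast takes two parent steps, slow one; a pointer reaching a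
-- parentless node returns it, a meeting returns orig.  The Nat argument is a
-- fuel guard making the recursion structural; its fallback is orig, and the
-- proofs below show the call with fuel len+2 equals A on every input.
def pvFloyd (m : List (Int × Option Int)) (orig : Int) :
    Int → Int → Nat → Int
  | _, _, 0 => orig
  | slow, fast, n + 1 =>
    match pvStep m fast with
    | none => fast
    | some f1 =>
      match pvStep m f1 with
      | none => f1
      | some f2 =>
        match pvStep m slow with
        | none => slow
        | some s1 => if s1 = f2 then orig else pvFloyd m orig s1 f2 n

def compute_root_id_alt (comment_id : Option Int) (_parent_id : Option Int)
    (parent_map : List (Int × Option Int)) : Option Int :=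
  match comment_id with
  | none => none
  | some c => some (pvFloyd parent_map c c c (parent_map.length + 2))

-- ===== PRECONDITION & SPEC =====
def Spec_compute_root_id (comment_id : Option Int) (parent_id : Option Int) (parent_map : List (Int × Option Int)) (out : Option Int) : Prop := out = compute_root_id_alt comment_id parent_id parent_map
instance (comment_id : Option Int) (parent_id : Option Int) (parent_map : List (Int × Option Int)) (out : Option Int) : Decidable (Spec_compute_root_id comment_id parent_id parent_map out) := by unfold Spec_compute_root_id; infer_instance

-- ===== CLAIM (what is proved, stated in full; the proofs are below) =====
def Claim_equal_compute_root_id : Prop := ∀ (comment_id : Option Int) (parent_id : Option Int) (parent_map : List (Int × Option Int)), Dom_compute_root_id comment_id parent_id parent_map → Spec_compute_root_id comment_id parent_id parent_map (compute_root_id comment_id parent_id parent_map)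

-- ===== LEMMAS AND PROOFS =====

-- reference bounded walk (proof tool only): at most `fuel` steps; none = fuel out
def pvRef (m : List (Int × Option Int)) (x : Int) : Nat → Option Int
  | 0 => none
  | n + 1 =>
    match pvStep m x with
    | none => some x
    | some p => pvRef m p n

-- the trajectory: pvW m x k = the node k parent-steps from x (none if the walk ends)
def pvW (m : List (Int × Option Int)) (x : Int) : Nat → Option Int
  | 0 => some x
  | n + 1 =>
    match pvStep m x with
    | none => none
    | some p => pvW m p n

theorem pvW_add (m : List (Int × Option Int)) (a : Nat) :
    ∀ (b : Nat) (x : Int),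
      pvW m x (a + b) = (pvW m x a).bind (fun y => pvW m y b) := by
  induction a with
  | zero => intro b x; simp [pvW]
  | succ n ih =>
    intro b x
    have : n + 1 + b = (n + b) + 1 := by omega
    rw [this]
    cases h : pvStep m x with
    | none => simp [pvW, h]
    | some p => simp [pvW, h, ih b p]

theorem pvW_succ_right (m : List (Int × Option Int)) (x : Int) (j : Nat) :
    pvW m x (j + 1) = (pvW m x j).bind (fun y => pvStep m y) := by
  rw [pvW_add m j 1 x]
  cases pvW m x j with
  | none => rfl
  | some y =>
    cases h : pvStep m y with
    | none => simp [pvW, h]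
    | some p => simp [pvW, h]

theorem pvW_none_mono (m : List (Int × Option Int)) (x : Int) {a b : Nat}
    (h : pvW m x a = none) (hab : a ≤ b) : pvW m x b = none := by
  have : b = a + (b - a) := by omega
  rw [this, pvW_add, h]; rfl

-- a repeat on the trajectory gives arbitrarily late occurrences of its value
theorem pvW_repeat (m : List (Int × Option Int)) (x v : Int) {a b : Nat}
    (ha : pvW m x a = some v) (hb : pvW m x b = some v) (hab : a < b) :
    ∀ k, pvW m x (a + k * (b - a)) = some v := by
  have hvv : pvW m v (b - a) = some v := by
    have : b = a + (b - a) := by omega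
    rw [this, pvW_add, ha] at hb; simpa using hb
  intro k
  induction k with
  | zero => simpa using ha
  | succ n ih =>
    have : a + (n + 1) * (b - a) = (a + n * (b - a)) + (b - a) := by ring
    rw [this, pvW_add, ih]; simpa using hvv

-- no repeat can occur strictly before a terminal node (injectivity on [0,T])
theorem pvW_no_repeat (m : List (Int × Option Int)) (x r v : Int) {T a b : Nat}
    (hT : pvW m x T = some r) (hr : pvStep m r = none)
    (ha : pvW m x a = some v) (hb : pvW m x b = some v)
    (hab : a < b) (hbT : b ≤ T) : False := by
  have hvv : pvW m v (b - a) = some v := by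
    have : b = a + (b - a) := by omega
    rw [this, pvW_add, ha] at hb; simpa using hb
  have hvr : pvW m v (T - a) = some r := by
    have : T = a + (T - a) := by omega
    rw [this, pvW_add, ha] at hT; simpa using hT
  have h1 : pvW m v ((T - a) + (b - a)) = some r := by
    have : (T - a) + (b - a) = (b - a) + (T - a) := by ring
    rw [this, pvW_add, hvv]; simpa using hvr
  have h2 : pvW m v ((T - a) + (b - a)) = pvW m r (b - a) := by
    rw [pvW_add, hvr]; simp
  have hba : ∃ k, b - a = k + 1 := ⟨b - a - 1, by omega⟩
  obtain ⟨k, hk⟩ := hba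
  rw [h2, hk] at h1
  simp [pvW, hr] at h1

-- every step strictly before a terminal node succeeds
theorem pvW_step_of_lt (m : List (Int × Option Int)) (x r y : Int) {T j : Nat}
    (hT : pvW m x T = some r) (_hr : pvStep m r = none)
    (hj : j < T) (hy : pvW m x j = some y) :
    ∃ y', pvStep m y = some y' ∧ pvW m x (j + 1) = some y' := by
  have hdef : pvW m x (j + 1) ≠ none := by
    intro hnone
    have := pvW_none_mono m x hnone (by omega : j + 1 ≤ T)
    rw [this] at hT
    simp at hT
  rw [pvW_succ_right, hy] at hdef ⊢
  cases h : pvStep m y with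
  | none => simp [h] at hdef
  | some y' => exact ⟨y', rfl, by simp [h]⟩

-- pvRef finding a root means the trajectory reaches a terminal node
theorem pvRef_some (m : List (Int × Option Int)) :
    ∀ (n : Nat) (x r : Int), pvRef m x n = some r →
      ∃ T < n, pvW m x T = some r ∧ pvStep m r = none := by
  intro n
  induction n with
  | zero => intro x r h; simp [pvRef] at h
  | succ k ih =>
    intro x r h
    cases hs : pvStep m x with
    | none =>
      simp only [pvRef, hs, Option.some.injEq] at h
      subst h
      exact ⟨0, by omega, rfl, hs⟩
    | some p =>
      simp only [pvRef, hs] at h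
      obtain ⟨T, hTk, hW, hr⟩ := ih p r h
      exact ⟨T + 1, by omega, by simpa [pvW, hs] using hW, hr⟩

-- pvRef exhausting its fuel means the trajectory survives that many steps
theorem pvRef_none (m : List (Int × Option Int)) :
    ∀ (n : Nat) (x : Int), pvRef m x n = none → pvW m x n ≠ none := by
  intro n
  induction n with
  | zero => intro x _ h; simp [pvW] at h
  | succ k ih =>
    intro x h
    cases hs : pvStep m x with
    | none => simp [pvRef, hs] at h
    | some p =>
      simp only [pvRef, hs] at h
      simpa [pvW, hs] using ih p h

-- FLOYD, rooted case: with slow = X i, fast = X 2i on a chain terminating at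
-- step T, the loop returns the terminal node
theorem pvFloyd_rooted (m : List (Int × Option Int)) (orig c r : Int) {T : Nat}
    (hT : pvW m c T = some r) (hr : pvStep m r = none) :
    ∀ (n i : Nat) (s f : Int), pvW m c i = some s → pvW m c (2 * i) = some f →
      2 * i ≤ T → T - 2 * i < n → pvFloyd m orig s f n = r := by
  intro n
  induction n with
  | zero => intro i s f _ _ _ h; omega
  | succ k ih =>
    intro i s f hs hf h2i hfuel
    rcases Nat.lt_or_ge (2 * i) T with hlt | hge
    · -- fast's first step succeeds
      obtain ⟨f1, hsf, hWf1⟩ := pvW_step_of_lt m c r f hT hr hlt hf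
      rcases Nat.lt_or_ge (2 * i + 1) T with hlt1 | hge1
      · -- fast's second step succeeds
        obtain ⟨f2, hsf1, hWf2⟩ := pvW_step_of_lt m c r f1 hT hr hlt1 hWf1
        -- slow's step succeeds (i < T)
        have hiT : i < T := by omega
        obtain ⟨s1, hss, hWs1⟩ := pvW_step_of_lt m c r s hT hr hiT hs
        have hne : s1 ≠ f2 := by
          intro he
          exact pvW_no_repeat m c r s1 hT hr hWs1 (he ▸ hWf2)
            (by omega) (by omega)
        simp only [pvFloyd, hsf, hsf1, hss, if_neg hne]
        exact ih (i + 1) s1 f2 hWs1 (by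
          have : 2 * (i + 1) = 2 * i + 1 + 1 := by ring
          rw [this]; exact hWf2) (by omega) (by omega)
      · -- 2i + 1 = T: fast's second step hits the root
        have hTe : 2 * i + 1 = T := by omega
        have : f1 = r := by
          rw [hTe] at hWf1; rw [hWf1] at hT; exact (Option.some.inj hT)
        simp only [pvFloyd, hsf, this, hr]
    · -- 2i = T: fast is already the root
      have hTe : 2 * i = T := by omega
      have : f = r := by
        rw [hTe] at hf; rw [hf] at hT; exact (Option.some.inj hT)
      simp only [pvFloyd, this, hr]

-- FLOYD, cyclic case: on a never-ending trajectory the loop returns orig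
theorem pvFloyd_forever (m : List (Int × Option Int)) (orig c : Int)
    (hall : ∀ j, pvW m c j ≠ none) :
    ∀ (n i : Nat) (s f : Int), pvW m c i = some s → pvW m c (2 * i) = some f →
      pvFloyd m orig s f n = orig := by
  intro n
  induction n with
  | zero => intro i s f _ _; rfl
  | succ k ih =>
    intro i s f hs hf
    have step : ∀ (j : Nat) (y : Int), pvW m c j = some y →
        ∃ y', pvStep m y = some y' ∧ pvW m c (j + 1) = some y' := by
      intro j y hy
      have := hall (j + 1)
      rw [pvW_succ_right, hy] at this ⊢
      cases h : pvStep m y with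
      | none => simp [h] at this
      | some y' => exact ⟨y', rfl, by simp [h]⟩
    obtain ⟨f1, hsf, hWf1⟩ := step (2 * i) f hf
    obtain ⟨f2, hsf1, hWf2⟩ := step (2 * i + 1) f1 hWf1
    obtain ⟨s1, hss, hWs1⟩ := step i s hs
    by_cases he : s1 = f2
    · simp [pvFloyd, hsf, hsf1, hss, he]
    · simp only [pvFloyd, hsf, hsf1, hss, if_neg he]
      exact ih (i + 1) s1 f2 hWs1 (by
        have : 2 * (i + 1) = 2 * i + 1 + 1 := by ring
        rw [this]; exact hWf2)

-- a trajectory surviving len+1 steps repeats a value (pigeonhole on live keys)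
theorem pvW_exists_repeat (m : List (Int × Option Int)) (c : Int)
    (h : pvW m c (m.length + 1) ≠ none) :
    ∃ a b v, a < b ∧ pvW m c a = some v ∧ pvW m c b = some v := by
  have hdef : ∀ j ≤ m.length + 1, pvW m c j ≠ none := by
    intro j hj hnone
    exact h (pvW_none_mono m c hnone hj)
  have hmaps : ∀ j ∈ Finset.range (m.length + 1),
      (pvW m c j).getD 0 ∈ pvLiveKeys m := by
    intro j hj
    rw [Finset.mem_range] at hj
    obtain ⟨y, hy⟩ := Option.ne_none_iff_exists'.mp (hdef j (by omega))
    have hnext : pvStep m y ≠ none := by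
      intro hn
      have := hdef (j + 1) (by omega)
      rw [pvW_succ_right, hy] at this
      simp [hn] at this
    simp only [pvLiveKeys, Finset.mem_filter, List.mem_toFinset, hy]
    exact ⟨pvStep_mem_keys m y hnext, by simpa using hnext⟩
  have hcard : (pvLiveKeys m).card < (Finset.range (m.length + 1)).card := by
    have h1 : (pvLiveKeys m).card ≤ (m.map Prod.fst).toFinset.card :=
      Finset.card_le_card (Finset.filter_subset _ _)
    have h2 : (m.map Prod.fst).toFinset.card ≤ m.length := by
      calc (m.map Prod.fst).toFinset.card ≤ (m.map Prod.fst).length :=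
            (m.map Prod.fst).toFinset_card_le
        _ = m.length := by simp
    simp only [Finset.card_range]
    omega
  obtain ⟨a, ha, b, hb, hab, heq⟩ :=
    Finset.exists_ne_map_eq_of_card_lt_of_maps_to hcard hmaps
  rw [Finset.mem_range] at ha hb
  obtain ⟨va, hva⟩ := Option.ne_none_iff_exists'.mp (hdef a (by omega))
  obtain ⟨vb, hvb⟩ := Option.ne_none_iff_exists'.mp (hdef b (by omega))
  have hv : va = vb := by simpa [hva, hvb] using heq
  rcases Nat.lt_or_ge a b with hlt | hge
  · exact ⟨a, b, va, hlt, hva, hv ▸ hvb⟩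
  · have : b < a := by omega
    exact ⟨b, a, vb, this, hvb, hv ▸ hva⟩

-- a repeated value keeps the trajectory alive forever
theorem pvW_forever (m : List (Int × Option Int)) (c v : Int) {a b : Nat}
    (ha : pvW m c a = some v) (hb : pvW m c b = some v) (hab : a < b) :
    ∀ j, pvW m c j ≠ none := by
  intro j hnone
  have hge : j ≤ a + j * (b - a) := by
    have h1 : 1 ≤ b - a := by omega
    have := Nat.mul_le_mul_left j h1
    omega
  have := pvW_repeat m c v ha hb hab j
  rw [pvW_none_mono m c hnone hge] at this
  exact (by simp at this : False)

-- ===== old A-side machinery: A's loop equals the reference bounded walk =====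

-- on a set closed under pvStep the bounded walk never finds a root
theorem pvRef_none_closed (m : List (Int × Option Int)) (C : List Int)
    (hC : ∀ s ∈ C, ∃ p, pvStep m s = some p ∧ p ∈ C) :
    ∀ (fuel : Nat) (x : Int), x ∈ C → pvRef m x fuel = none := by
  intro fuel
  induction fuel with
  | zero => intro x _; rfl
  | succ n ih =>
    intro x hx
    obtain ⟨p, hp, hpC⟩ := hC x hx
    simp [pvRef, hp, ih p hpC]

-- main invariant: while enough fuel remains A's loop equals the bounded walk
theorem pvALoop_eq_pvRef (m : List (Int × Option Int)) (orig : Int) :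
    ∀ (fuel : Nat) (x : Int) (seen : PySem.Set Int),
      (∀ s ∈ seen, ∃ p, pvStep m s = some p ∧ (p ∈ seen ∨ p = x)) →
      ((pvLiveKeys m).filter (fun k => k ∉ seen)).card < fuel →
      pvALoop m orig x seen = (pvRef m x fuel).getD orig := by
  intro fuel
  induction fuel with
  | zero => intro x seen _ hcard; omega
  | succ n ih =>
    intro x seen hchain hcard
    by_cases hx : x ∈ seen
    · -- revisit: seen is closed under pvStep, so the walk exhausts its fuel
      have hclosed : ∀ s ∈ seen, ∃ p, pvStep m s = some p ∧ p ∈ seen := by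
        intro s hs
        obtain ⟨p, hp, hps⟩ := hchain s hs
        exact ⟨p, hp, hps.elim id (fun e => e ▸ hx)⟩
      rw [pvALoop, if_pos (by simpa [PySem.Set.contains] using hx),
          pvRef_none_closed m seen hclosed (n + 1) x hx]
      rfl
    · rw [pvALoop, if_neg (by simpa [PySem.Set.contains] using hx)]
      cases h : pvStep m x with
      | none => simp [pvRef, h]
      | some p =>
        simp only [pvRef, h]
        apply ih
        · intro s hs
          rcases (PySem.Set.mem_add seen x s).mp hs with hs' | hs'
          · obtain ⟨q, hq, hqs⟩ := hchain s hs'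
            refine ⟨q, hq, Or.inl ?_⟩
            rcases hqs with h1 | h1
            · exact (PySem.Set.mem_add seen x q).mpr (Or.inl h1)
            · exact (PySem.Set.mem_add seen x q).mpr (Or.inr h1)
          · exact ⟨p, hs' ▸ h, Or.inr rfl⟩
        · have hxk : x ∈ pvLiveKeys m := by
            simp only [pvLiveKeys, Finset.mem_filter, List.mem_toFinset]
            exact ⟨pvStep_mem_keys m x (by simp [h]), by simp [h]⟩
          have hlt : ((pvLiveKeys m).filter (fun k => k ∉ PySem.Set.add seen x)).card
              < ((pvLiveKeys m).filter (fun k => k ∉ seen)).card := by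
            apply Finset.card_lt_card
            constructor
            · intro k hk
              simp only [Finset.mem_filter] at hk ⊢
              exact ⟨hk.1, fun hmem => hk.2 (by simpa using (PySem.Set.mem_add seen x k).mpr (Or.inl hmem))⟩
            · intro hsub
              have hx' : x ∈ (pvLiveKeys m).filter (fun k => k ∉ seen) :=
                Finset.mem_filter.mpr ⟨hxk, by simpa using hx⟩
              have h2 : x ∉ PySem.Set.add seen x := by
                simpa using (Finset.mem_filter.mp (hsub hx')).2
              exact h2 ((PySem.Set.mem_add seen x x).mpr (Or.inr rfl))
          omega

-- initial fuel bound: at most length-many live keys exist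
theorem pvLiveKeys_card_le (m : List (Int × Option Int)) :
    (pvLiveKeys m).card ≤ m.length := by
  calc (pvLiveKeys m).card ≤ (m.map Prod.fst).toFinset.card :=
        Finset.card_le_card (Finset.filter_subset _ _)
    _ ≤ (m.map Prod.fst).length := (m.map Prod.fst).toFinset_card_le
    _ = m.length := by simp

-- ===== VERDICT (by name: the statement is the Claim_ definition above) =====
theorem compute_root_id_spec : Claim_equal_compute_root_id := by
  intro comment_id parent_id parent_map _
  unfold Spec_compute_root_id
  cases comment_id with
  | none => rfl
  | some c =>
    simp only [compute_root_id, compute_root_id_alt]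
    congr 1
    have hA : pvALoop parent_map c c PySem.Set.empty
        = (pvRef parent_map c (parent_map.length + 1)).getD c := by
      apply pvALoop_eq_pvRef
      · intro s hs; cases hs
      · have h1 := pvLiveKeys_card_le parent_map
        have h2 : ((pvLiveKeys parent_map).filter
            (fun k => k ∉ (PySem.Set.empty : PySem.Set Int))).card
            ≤ (pvLiveKeys parent_map).card :=
          Finset.card_le_card (Finset.filter_subset _ _)
        omega
    rw [hA]
    cases h : pvRef parent_map c (parent_map.length + 1) with
    | some r =>
      obtain ⟨T, hTlt, hW, hr⟩ := pvRef_some parent_map _ c r h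
      have := pvFloyd_rooted parent_map c c r hW hr
        (parent_map.length + 2) 0 c c (by simp [pvW]) (by simp [pvW])
        (by omega) (by omega)
      simp [this]
    | none =>
      have hne := pvRef_none parent_map _ c h
      obtain ⟨a, b, v, hab, hva, hvb⟩ := pvW_exists_repeat parent_map c hne
      have hall := pvW_forever parent_map c v hva hvb hab
      have := pvFloyd_forever parent_map c c hall
        (parent_map.length + 2) 0 c c (by simp [pvW]) (by simp [pvW])
      simp [this]
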